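-- pv_equiv track=rewrite | github.com/Kneidl18/Identifying-the-Structure-of-an-Artificial-Neural-Network-from-a-Flat-XML-File | util.py | keep_repeats_and_group
-- ===== SOURCE A (Python) =====
-- import itertools as iter
--
-- def keep_repeats_and_group(xs: list) -> list:
--     # remove non-repeats
--     repeats = []
--     prevPrev = None
--     prev = None
--     for x in xs:
--         # only added to list if repeated twice
--         # cause one repeat might happen by sheer coincidence
--         if prev == x and prevPrev == x:
--             repeats.append(x)
--         prevPrev = prev
--         prev = x
--
--     # map each group to the value of the group
--     return list(map(lambda x: x[0], iter.groupby(repeats)))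
-- ===== SOURCE B (Python) =====
-- from itertools import groupby
--
-- def keep_repeats_and_group(xs: list) -> list:
--     # keep the key of each maximal run of length >= 3 ...
--     vals = [k for k, g in groupby(xs) if sum(1 for _ in g) >= 3]
--     # ... then collapse consecutive duplicate keys
--     return [k for k, _ in groupby(vals)]
-- ===== Notes on version B (the rewrite author's own statement) =====
-- stated objective: idiomatic
-- what changed: B forms maximal runs with itertools.groupby and keeps each run's key when the run length is >= 3, then collapses consecutive duplicate keys with a second groupby, instead of A's prevPrev/prev sliding window that emits L-2 copies per run before grouping.
import Mathlib
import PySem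

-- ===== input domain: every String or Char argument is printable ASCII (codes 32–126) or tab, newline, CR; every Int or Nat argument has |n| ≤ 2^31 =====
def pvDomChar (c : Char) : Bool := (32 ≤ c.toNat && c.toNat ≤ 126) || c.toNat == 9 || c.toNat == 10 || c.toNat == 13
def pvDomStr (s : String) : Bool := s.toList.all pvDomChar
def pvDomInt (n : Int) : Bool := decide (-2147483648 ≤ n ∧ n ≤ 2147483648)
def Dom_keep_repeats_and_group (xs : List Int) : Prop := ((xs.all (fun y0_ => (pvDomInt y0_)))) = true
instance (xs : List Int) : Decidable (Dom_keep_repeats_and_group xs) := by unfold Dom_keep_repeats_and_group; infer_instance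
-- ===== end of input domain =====

-- B groups xs into maximal runs and keeps keys of runs of length >= 3, then collapses
-- consecutive duplicate keys (idiomatic decomposition; A emits L-2 copies per run via a
-- prevPrev/prev window before grouping). Same O(n) cost.

-- ===== PORT A =====

-- itertools.groupby keys (both Pythons end with this pass): collapse consecutive duplicates.
def pvDedupeGo (k : Int) : List Int → List Int
  | [] => []
  | x :: xs => if x = k then pvDedupeGo k xs else x :: pvDedupeGo x xs

def pvDedupe : List Int → List Int
  | [] => []
  | x :: xs => x :: pvDedupeGo x xs

-- the loop over xs with state (prevPrev, prev), emitting x when prev == x == prevPrev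
def pvARec (pp p : Option Int) : List Int → List Int
  | [] => []
  | x :: xs => (if p = some x ∧ pp = some x then [x] else []) ++ pvARec p (some x) xs

def keep_repeats_and_group (xs : List Int) : List Int :=
  pvDedupe (pvARec none none xs)

-- ===== PORT B =====

-- itertools.groupby as run-length encoding: maximal runs as (key, length)
def pvRunsGo (k : Int) (n : Nat) : List Int → List (Int × Nat)
  | [] => [(k, n)]
  | x :: xs => if x = k then pvRunsGo k (n + 1) xs else (k, n) :: pvRunsGo x 1 xs

def pvRuns : List Int → List (Int × Nat)
  | [] => []
  | x :: xs => pvRunsGo x 1 xs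

def keep_repeats_and_group_alt (xs : List Int) : List Int :=
  pvDedupe ((pvRuns xs).filterMap (fun p => if 3 ≤ p.2 then some p.1 else none))

-- ===== PRECONDITION & SPEC =====
def Spec_keep_repeats_and_group (xs : List Int) (out : List Int) : Prop := out = keep_repeats_and_group_alt xs
instance (xs : List Int) (out : List Int) : Decidable (Spec_keep_repeats_and_group xs out) := by unfold Spec_keep_repeats_and_group; infer_instance

-- ===== CLAIM (what is proved, stated in full; the proofs are below) =====
def Claim_equal_keep_repeats_and_group : Prop := ∀ (xs : List Int), Dom_keep_repeats_and_group xs → Spec_keep_repeats_and_group xs (keep_repeats_and_group xs)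

-- ===== LEMMAS AND PROOFS =====

-- the repeats run r contributes replicate (len-2) key
def pvFlat (rl : List (Int × Nat)) : List Int :=
  rl.flatMap (fun p => List.replicate (p.2 - 2) p.1)

def pvKeys3 (rl : List (Int × Nat)) : List Int :=
  rl.filterMap (fun p => if 3 ≤ p.2 then some p.1 else none)

-- A's window, run-local view: having already emitted n-2 copies of the current run's key k,
-- the remaining emissions equal pvFlat of the remaining run structure.
theorem pvARec_runs (xs : List Int) (k : Int) (n : Nat) (pp : Option Int)
    (hn : 1 ≤ n) (hpp : pp = some k ↔ 2 ≤ n) :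
    List.replicate (n - 2) k ++ pvARec pp (some k) xs = pvFlat (pvRunsGo k n xs) := by
  induction xs generalizing k n pp with
  | nil =>
    simp [pvARec, pvRunsGo, pvFlat]
  | cons x xs ih =>
    by_cases hxk : x = k
    · subst hxk
      rw [pvARec, pvRunsGo]
      simp only [true_and, if_true]
      have ihx := ih x (n + 1) (some x) (by omega) (by simp; omega)
      rw [← ihx]
      by_cases h : pp = some x
      · have h2n : 2 ≤ n := hpp.mp h
        simp only [h, if_true]
        have he : n + 1 - 2 = (n - 2) + 1 := by omega
        rw [he, List.replicate_succ' (n := n - 2)]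
        simp
      · have hn1 : n = 1 := by
          have : ¬ 2 ≤ n := fun h2 => h (hpp.mpr h2)
          omega
        subst hn1
        simp [h]
    · rw [pvARec, pvRunsGo, if_neg hxk]
      have hne : ¬ (some k = some x ∧ pp = some x) := by
        intro ⟨h1, _⟩; exact hxk (Option.some.inj h1).symm
      simp only [if_neg hne, List.nil_append]
      have ihx := ih x 1 (some k) le_rfl
        (by simp; intro h; exact absurd h.symm hxk)
      simp only [show (1 : Nat) - 2 = 0 from rfl, List.replicate_zero, List.nil_append] at ihx
      rw [pvFlat, List.flatMap_cons, ← pvFlat]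
      rw [← ihx]

theorem pvARec_eq_flat (xs : List Int) :
    pvARec none none xs = pvFlat (pvRuns xs) := by
  cases xs with
  | nil => simp [pvARec, pvRuns, pvFlat]
  | cons x xs =>
    rw [pvARec, pvRuns]
    simp only [if_neg (by simp : ¬ ((none : Option Int) = some x ∧ (none : Option Int) = some x)), List.nil_append]
    have h := pvARec_runs xs x 1 none le_rfl (by simp)
    simpa using h

-- dedupeGo swallows copies of its own state
theorem pvDedupeGo_replicate (j : Nat) (a : Int) (t : List Int) :
    pvDedupeGo a (List.replicate j a ++ t) = pvDedupeGo a t := by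
  induction j with
  | zero => simp
  | succ j ih => simpa [List.replicate_succ, pvDedupeGo] using ih

theorem pvDedupeGo_flat (rl : List (Int × Nat)) : ∀ (k : Int),
    pvDedupeGo k (pvFlat rl) = pvDedupeGo k (pvKeys3 rl) := by
  induction rl with
  | nil => intro k; rfl
  | cons p rest ih =>
    intro k
    obtain ⟨a, m⟩ := p
    rw [pvFlat, List.flatMap_cons, ← pvFlat, pvKeys3, List.filterMap_cons, ← pvKeys3]
    by_cases hm : 3 ≤ m
    · have hm2 : m - 2 = (m - 3) + 1 := by omega
      rw [if_pos hm, hm2, List.replicate_succ, List.cons_append]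
      by_cases hak : a = k
      · subst hak
        simp only [pvDedupeGo]
        rw [pvDedupeGo_replicate, ih]
      · simp only [pvDedupeGo, if_neg hak]
        rw [pvDedupeGo_replicate, ih]
    · have : m - 2 = 0 := by omega
      rw [if_neg hm, this]
      simpa using ih k

theorem pvDedupe_flat (rl : List (Int × Nat)) :
    pvDedupe (pvFlat rl) = pvDedupe (pvKeys3 rl) := by
  induction rl with
  | nil => rfl
  | cons p rest ih =>
    obtain ⟨a, m⟩ := p
    rw [pvFlat, List.flatMap_cons, ← pvFlat, pvKeys3, List.filterMap_cons, ← pvKeys3]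
    by_cases hm : 3 ≤ m
    · have hm2 : m - 2 = (m - 3) + 1 := by omega
      rw [if_pos hm, hm2, List.replicate_succ, List.cons_append]
      simp only [pvDedupe]
      rw [pvDedupeGo_replicate, pvDedupeGo_flat]
    · have : m - 2 = 0 := by omega
      rw [if_neg hm, this]
      simpa using ih

-- ===== VERDICT (by name: the statement is the Claim_ definition above) =====
theorem keep_repeats_and_group_spec : Claim_equal_keep_repeats_and_group := by
  intro xs _
  unfold Spec_keep_repeats_and_group keep_repeats_and_group keep_repeats_and_group_alt
  rw [pvARec_eq_flat, pvDedupe_flat]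
  rfl
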